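-- pv_equiv track=rewrite | github.com/Fan-zexu/bilibili-subtitle-extractor-skill | scripts/extract_subtitle.py | pick_best_subtitle
-- ===== SOURCE A (Python) =====
-- from typing import Optional
--
-- PREFERRED_LANGS = ["zh-Hans", "zh", "zh-CN", "ai-zh", "en", "ja", "ko"]
--
-- def pick_best_subtitle(subtitle_list: list) -> Optional[dict]:
--     if not subtitle_list:
--         return None
--     for pref in PREFERRED_LANGS:
--         for s in subtitle_list:
--             if s.get("lan", "") == pref:
--                 return s
--     return subtitle_list[0]
-- ===== SOURCE B (Python) =====
-- PREFERRED_LANGS = ["zh-Hans", "zh", "zh-CN", "ai-zh", "en", "ja", "ko"]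
--
-- def _rank(s):
--     lan = s.get("lan", "")
--     return PREFERRED_LANGS.index(lan) if lan in PREFERRED_LANGS else len(PREFERRED_LANGS)
--
-- def pick_best_subtitle(subtitle_list):
--     if not subtitle_list:
--         return None
--     best = subtitle_list[0]
--     best_rank = _rank(best)
--     for s in subtitle_list[1:]:
--         r = _rank(s)
--         if r < best_rank:
--             best, best_rank = s, r
--     return best
-- ===== Notes on version B (the rewrite author's own statement) =====
-- stated objective: alternative
-- what changed: B replaces A's priority-ordered repeated scans (one pass over subtitle_list per preferred language) by a single running-minimum pass: each subtitle gets a numeric preference rank (index in PREFERRED_LANGS, or 7 if absent) and B keeps the first subtitle with the smallest rank, which subsumes A's subtitle_list[0] fallback since every rank is then 7.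
import Mathlib
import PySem

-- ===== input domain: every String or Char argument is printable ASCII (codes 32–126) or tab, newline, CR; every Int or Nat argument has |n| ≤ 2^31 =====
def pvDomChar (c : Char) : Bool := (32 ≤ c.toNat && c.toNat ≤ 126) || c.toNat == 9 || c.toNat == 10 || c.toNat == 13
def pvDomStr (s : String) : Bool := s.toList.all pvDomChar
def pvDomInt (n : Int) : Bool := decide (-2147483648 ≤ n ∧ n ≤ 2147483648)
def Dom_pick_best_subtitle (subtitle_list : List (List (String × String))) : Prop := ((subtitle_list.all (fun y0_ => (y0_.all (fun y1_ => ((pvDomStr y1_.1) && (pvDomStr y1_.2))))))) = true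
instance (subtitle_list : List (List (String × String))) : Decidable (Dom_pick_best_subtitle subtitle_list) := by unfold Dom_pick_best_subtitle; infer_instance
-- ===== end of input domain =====

-- B replaces A's priority-ordered repeated scans by one running-minimum pass over the list,
-- ranking each subtitle numerically by its language's index in PREFERRED_LANGS (alternative decomposition, same cost).

-- ===== PORT A =====
def PREFERRED_LANGS : List String := ["zh-Hans", "zh", "zh-CN", "ai-zh", "en", "ja", "ko"]

-- s.get("lan", "")
def pvLan (s : List (String × String)) : String := (PySem.Dict.mk s).getD "lan" ""

-- inner loop: 'for s in subtitle_list: if s.get("lan","") == pref: return s'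
def pvScanA (pref : String) : List (List (String × String)) → Option (List (String × String))
  | [] => none
  | s :: rest => if pvLan s == pref then some s else pvScanA pref rest

-- outer loop: 'for pref in PREFERRED_LANGS: …'
def pvOuterA : List String → List (List (String × String)) → Option (List (String × String))
  | [], _ => none
  | pref :: ps, l =>
    match pvScanA pref l with
    | some s => some s
    | none => pvOuterA ps l

def pick_best_subtitle (subtitle_list : List (List (String × String))) : Option (List (String × String)) :=
  if subtitle_list.isEmpty then none
  else
    match pvOuterA PREFERRED_LANGS subtitle_list with
    | some s => some s
    | none => subtitle_list.head?   -- return subtitle_list[0] (list known nonempty)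

-- ===== PORT B =====
-- _rank(s): PREFERRED_LANGS.index(lan) if lan in PREFERRED_LANGS else len(PREFERRED_LANGS)
def pvRank (s : List (String × String)) : Nat :=
  let lan := pvLan s
  if PREFERRED_LANGS.contains lan then PREFERRED_LANGS.idxOf lan else PREFERRED_LANGS.length

-- 'best = l[0]; for s in l[1:]: if _rank(s) < best_rank: best, best_rank = s, r'
def pick_best_subtitle_alt (subtitle_list : List (List (String × String))) : Option (List (String × String)) :=
  match subtitle_list with
  | [] => none
  | b0 :: rest =>
    some (rest.foldl
      (fun acc s => let r := pvRank s; if r < acc.2 then (s, r) else acc)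
      (b0, pvRank b0)).1

-- ===== PRECONDITION & SPEC =====
def Spec_pick_best_subtitle (subtitle_list : List (List (String × String))) (out : Option (List (String × String))) : Prop := out = pick_best_subtitle_alt subtitle_list
instance (subtitle_list : List (List (String × String))) (out : Option (List (String × String))) : Decidable (Spec_pick_best_subtitle subtitle_list out) := by unfold Spec_pick_best_subtitle; infer_instance

-- ===== CLAIM (what is proved, stated in full; the proofs are below) =====
def Claim_equal_pick_best_subtitle : Prop := ∀ (subtitle_list : List (List (String × String))), Dom_pick_best_subtitle subtitle_list → Spec_pick_best_subtitle subtitle_list (pick_best_subtitle subtitle_list)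

-- ===== LEMMAS AND PROOFS =====

-- rank of a subtitle with respect to a candidate preference list
def rkIn (ps : List String) (s : List (String × String)) : Nat :=
  ps.findIdx (fun p => pvLan s == p)

-- first element of l of minimal rank (ties to the earlier element)
def msel (rk : List (String × String) → Nat) :
    List (List (String × String)) → Option (List (String × String))
  | [] => none
  | s :: rest =>
    match msel rk rest with
    | none => some s
    | some t => if rk t < rk s then some t else some s

theorem msel_mem {rk : List (String × String) → Nat}
    {l : List (List (String × String))} {t : List (String × String)}
    (h : msel rk l = some t) : t ∈ l := by
  induction l with
  | nil => simp [msel] at h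
  | cons s rest ih =>
    simp only [msel] at h
    cases hm : msel rk rest with
    | none =>
      rw [hm] at h
      injection h with h; subst h; exact List.mem_cons_self ..
    | some u =>
      rw [hm] at h
      dsimp only at h
      by_cases hc : rk u < rk s
      · rw [if_pos hc] at h
        injection h with h; subst h; exact List.mem_cons_of_mem _ (ih hm)
      · rw [if_neg hc] at h
        injection h with h; subst h; exact List.mem_cons_self ..

theorem scanA_some {p : String} {l : List (List (String × String))}
    {t : List (String × String)} (h : pvScanA p l = some t) : (pvLan t == p) = true := by
  induction l with
  | nil => simp [pvScanA] at h
  | cons s rest ih =>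
    simp only [pvScanA] at h
    by_cases hc : (pvLan s == p) = true
    · simp [hc] at h; subst h; exact hc
    · simp [hc] at h; exact ih h

theorem scanA_none {p : String} {l : List (List (String × String))}
    (h : pvScanA p l = none) : ∀ x ∈ l, (pvLan x == p) = false := by
  induction l with
  | nil => intro x hx; simp at hx
  | cons s rest ih =>
    simp only [pvScanA] at h
    by_cases hc : (pvLan s == p) = true
    · simp [hc] at h
    · simp [hc] at h
      intro x hx
      rcases List.mem_cons.mp hx with rfl | hx'
      · simpa using hc
      · exact ih h x hx'

theorem rkIn_cons (p : String) (ps : List String) (s : List (String × String)) :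
    rkIn (p :: ps) s = if (pvLan s == p) = true then 0 else rkIn ps s + 1 := by
  simp only [rkIn, List.findIdx_cons]
  by_cases h : (pvLan s == p) = true <;> simp [h]

-- priority scan for p absorbed into the rank-minimum
theorem msel_cons_lang (p : String) (ps : List String) (l : List (List (String × String))) :
    msel (rkIn (p :: ps)) l =
      match pvScanA p l with
      | some t => some t
      | none => msel (rkIn ps) l := by
  induction l with
  | nil => simp [msel, pvScanA]
  | cons s rest ih =>
    by_cases hs : (pvLan s == p) = true
    · -- s matches p: both sides are `some s`
      have hrs : rkIn (p :: ps) s = 0 := by rw [rkIn_cons]; simp [hs]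
      simp only [msel, pvScanA, hs]
      cases hm : msel (rkIn (p :: ps)) rest with
      | none => simp
      | some t => simp [hrs]
    · have hrs : rkIn (p :: ps) s = rkIn ps s + 1 := by rw [rkIn_cons]; simp [hs]
      simp only [msel, pvScanA, hs]
      cases hscan : pvScanA p rest with
      | some t =>
        have ht : rkIn (p :: ps) t = 0 := by rw [rkIn_cons]; simp [scanA_some hscan]
        rw [hscan] at ih
        simp only [ih]
        have : rkIn (p :: ps) t < rkIn (p :: ps) s := by omega
        simp [this]
      | none =>
        rw [hscan] at ih
        simp only [ih]
        cases hm : msel (rkIn ps) rest with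
        | none => simp
        | some t =>
          have htmem : t ∈ rest := msel_mem hm
          have htp : (pvLan t == p) = false := scanA_none hscan t htmem
          have hrt : rkIn (p :: ps) t = rkIn ps t + 1 := by rw [rkIn_cons]; simp [htp]
          by_cases hlt : rkIn ps t < rkIn ps s
          · have : rkIn (p :: ps) t < rkIn (p :: ps) s := by omega
            simp [hlt, this]
          · have : ¬ rkIn (p :: ps) t < rkIn (p :: ps) s := by omega
            simp [hlt, this]

theorem msel_nil_rank (l : List (List (String × String))) :
    msel (rkIn []) l = l.head? := by
  induction l with
  | nil => simp [msel]
  | cons s rest ih =>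
    simp only [msel, ih]
    cases rest with
    | nil => simp
    | cons t r => simp [rkIn]

-- A's nested loops compute the first element of minimal rank
theorem outerA_eq_msel (ps : List String) (l : List (List (String × String))) :
    (match pvOuterA ps l with
      | some s => some s
      | none => l.head?) = msel (rkIn ps) l := by
  induction ps with
  | nil => simp [pvOuterA, msel_nil_rank]
  | cons p ps ih =>
    rw [msel_cons_lang]
    simp only [pvOuterA]
    cases hs : pvScanA p l with
    | some t => simp
    | none => simp [ih]

-- rank used by the B port agrees with rkIn on the full preference list
theorem rkIn_eq_idxOf (s : List (String × String)) :
    rkIn PREFERRED_LANGS s = PREFERRED_LANGS.idxOf (pvLan s) := by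
  have : PREFERRED_LANGS.idxOf (pvLan s) = PREFERRED_LANGS.findIdx (· == pvLan s) := by
    simp [List.idxOf, List.findIdx]
  rw [this, rkIn]
  congr 1
  funext p
  by_cases h : pvLan s = p
  · subst h; rfl
  · rw [beq_eq_false_iff_ne.mpr h, beq_eq_false_iff_ne.mpr (Ne.symm h)]

theorem pvRank_eq (s : List (String × String)) : pvRank s = rkIn PREFERRED_LANGS s := by
  rw [rkIn_eq_idxOf]
  simp only [pvRank]
  by_cases h : PREFERRED_LANGS.contains (pvLan s) = true
  · rw [if_pos h]
  · have hnm : pvLan s ∉ PREFERRED_LANGS := fun hm => h (List.contains_iff_mem.mpr hm)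
    rw [if_neg h, List.idxOf_eq_length_iff.mpr hnm]

-- running-minimum fold invariant
theorem foldB_eq (rest : List (List (String × String))) (b : List (String × String)) :
    rest.foldl (fun acc s => let r := pvRank s; if r < acc.2 then (s, r) else acc)
        (b, pvRank b)
      = match msel pvRank rest with
        | none => (b, pvRank b)
        | some t => if pvRank t < pvRank b then (t, pvRank t) else (b, pvRank b) := by
  induction rest generalizing b with
  | nil => simp [msel]
  | cons s r ih =>
    rw [List.foldl_cons]
    rw [show ((let rr := pvRank s;
          if rr < (b, pvRank b).2 then (s, rr) else (b, pvRank b)) :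
            List (String × String) × Nat)
          = if pvRank s < pvRank b then (s, pvRank s) else (b, pvRank b) from rfl]
    by_cases hsb : pvRank s < pvRank b
    · rw [if_pos hsb, ih s]
      simp only [msel]
      cases hm : msel pvRank r with
      | none => simp [hsb]
      | some t =>
        by_cases hts : pvRank t < pvRank s
        · have htb : pvRank t < pvRank b := lt_trans hts hsb
          simp [hts, htb]
        · simp [hts, hsb]
    · rw [if_neg hsb, ih b]
      simp only [msel]
      cases hm : msel pvRank r with
      | none => simp [hsb]
      | some t =>
        by_cases hts : pvRank t < pvRank s
        · simp [hts]
        · have htb : ¬ pvRank t < pvRank b := by omega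
          simp [hts, hsb, htb]

-- ===== VERDICT (by name: the statement is the Claim_ definition above) =====
theorem pick_best_subtitle_spec : Claim_equal_pick_best_subtitle := by
  intro l _
  unfold Spec_pick_best_subtitle pick_best_subtitle pick_best_subtitle_alt
  cases l with
  | nil => simp
  | cons b0 rest =>
    simp only [List.isEmpty_cons, Bool.false_eq_true, if_false]
    rw [outerA_eq_msel]
    have hk : msel (rkIn PREFERRED_LANGS) (b0 :: rest) = msel pvRank (b0 :: rest) := by
      have : pvRank = rkIn PREFERRED_LANGS := funext pvRank_eq
      rw [this]
    rw [hk]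
    simp only [msel, foldB_eq]
    cases hm : msel pvRank rest with
    | none => simp
    | some t => by_cases h : pvRank t < pvRank b0 <;> simp [h]
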